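-- pv_equiv track=rewrite | github.com/jurcicek/extended-hidden-vector-state-parser | trunk/semantics-4/src/toolkit.py | pairNames
-- ===== SOURCE A (Python) =====
-- def pairNames(firstName, first, secondName, second):
--     i = 0
--     j = 0
--
--     fA = []
--     sA = []
--     collectedName = []
--
--     for i in range(len(firstName)):
--         try:
--             j = secondName.index(firstName[i])
--
--             fA.append(first[i])
--             sA.append(second[j])
--             collectedName.append(firstName[i])
--
--         except ValueError:
--             pass
--
--     for i in range(len(secondName)):
--         try:
--             j = firstName.index(secondName[i])
--
--             try:
--                 k = collectedName.index(secondName[i])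
--                 # it is already there
--             except ValueError:
--                 # it is not there
--
--                 fA.append(first[i])
--                 sA.append(second[j])
--         except ValueError:
--             pass
--
--     return fA, sA
-- ===== SOURCE B (Python) =====
-- def pairNames(firstName, first, secondName, second):
--     # one pass: dict from each name to its first index in secondName
--     pos = {}
--     for j, name in enumerate(secondName):
--         pos.setdefault(name, j)
--     fA = []
--     sA = []
--     for i, name in enumerate(firstName):
--         j = pos.get(name)
--         if j is not None:
--             fA.append(first[i])
--             sA.append(second[j])
--     return fA, sA
-- ===== Notes on version B (the rewrite author's own statement) =====
-- stated objective: faster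
-- what changed: B replaces A's repeated linear secondName.index scans with one dict built in a single pass mapping each name to its first index, and drops A's second loop over secondName, which never appends (every name in both lists is already in collectedName).
import Mathlib
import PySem

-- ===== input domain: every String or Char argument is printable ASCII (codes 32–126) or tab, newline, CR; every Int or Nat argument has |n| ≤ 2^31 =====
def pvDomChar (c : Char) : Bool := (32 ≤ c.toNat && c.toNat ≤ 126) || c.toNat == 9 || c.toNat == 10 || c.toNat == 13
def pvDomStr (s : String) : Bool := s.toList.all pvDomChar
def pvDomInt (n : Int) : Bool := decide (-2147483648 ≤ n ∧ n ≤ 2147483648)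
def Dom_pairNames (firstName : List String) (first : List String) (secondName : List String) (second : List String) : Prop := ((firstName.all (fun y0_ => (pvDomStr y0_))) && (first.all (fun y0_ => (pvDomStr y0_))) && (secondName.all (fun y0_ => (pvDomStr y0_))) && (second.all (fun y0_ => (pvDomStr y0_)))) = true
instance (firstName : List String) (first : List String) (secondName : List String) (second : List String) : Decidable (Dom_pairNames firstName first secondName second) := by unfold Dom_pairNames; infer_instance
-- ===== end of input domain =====

-- B replaces A's repeated linear secondName.index scans with one dict of first indices built in a
-- single pass and drops A's second loop over secondName, which never appends anything.

-- ===== PORT A =====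
def pairNames (firstName : List String) (first : List String) (secondName : List String) (second : List String) : List String × List String :=
  let s1 := (PySem.List.pyRange 0 firstName.length 1).foldl
    (fun (st : List String × List String × List String) i =>
      match PySem.List.index? secondName (PySem.List.pyGetD firstName i "") with
      | some j => (st.1 ++ [PySem.List.pyGetD first i ""],
                   st.2.1 ++ [PySem.List.pyGetD second (j : Int) ""],
                   st.2.2 ++ [PySem.List.pyGetD firstName i ""])
      | none => st)
    ([], [], [])
  let s2 := (PySem.List.pyRange 0 secondName.length 1).foldl
    (fun (st : List String × List String × List String) i =>
      match PySem.List.index? firstName (PySem.List.pyGetD secondName i "") with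
      | some j =>
        match PySem.List.index? st.2.2 (PySem.List.pyGetD secondName i "") with
        | some _ => st
        | none => (st.1 ++ [PySem.List.pyGetD first i ""],
                   st.2.1 ++ [PySem.List.pyGetD second (j : Int) ""],
                   st.2.2)
      | none => st)
    s1
  (s2.1, s2.2.1)

-- ===== PORT B =====
def pairNames_alt (firstName : List String) (first : List String) (secondName : List String) (second : List String) : List String × List String :=
  let pos := (PySem.List.enumerate secondName).foldl
    (fun (d : PySem.Dict String Int) p => d.setdefault p.2 p.1) PySem.Dict.empty
  (PySem.List.enumerate firstName).foldl
    (fun (acc : List String × List String) p =>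
      match pos.get? p.2 with
      | some j => (acc.1 ++ [PySem.List.pyGetD first p.1 ""],
                   acc.2 ++ [PySem.List.pyGetD second j ""])
      | none => acc)
    ([], [])


-- ===== PRECONDITION & SPEC =====
-- Pre_ excludes exactly the inputs where Python A raises IndexError: some firstName[i] occurs in
-- secondName but first has no element at position i or second has none at secondName's first index of it.
def Pre_pairNames (firstName : List String) (first : List String) (secondName : List String) (second : List String) : Prop :=
  ∀ k, (hk : k < firstName.length) → firstName[k] ∈ secondName →
    k < first.length ∧ secondName.idxOf firstName[k] < second.length
instance (firstName : List String) (first : List String) (secondName : List String) (second : List String) : Decidable (Pre_pairNames firstName first secondName second) := by unfold Pre_pairNames; infer_instance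
def pvWitness_pairNames : List String × List String × List String × List String :=
  (["a", "b"], ["x", "y"], ["b", "c"], ["u", "v"])

def Spec_pairNames (firstName : List String) (first : List String) (secondName : List String) (second : List String) (out : List String × List String) : Prop := out = pairNames_alt firstName first secondName second
instance (firstName : List String) (first : List String) (secondName : List String) (second : List String) (out : List String × List String) : Decidable (Spec_pairNames firstName first secondName second out) := by unfold Spec_pairNames; infer_instance

-- ===== CLAIM (what is proved, stated in full; the proofs are below) =====
def Claim_equal_pairNames : Prop := ∀ (firstName : List String) (first : List String) (secondName : List String) (second : List String), Dom_pairNames firstName first secondName second → Pre_pairNames firstName first secondName second → Spec_pairNames firstName first secondName second (pairNames firstName first secondName second)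

-- ===== LEMMAS AND PROOFS =====

theorem pv_get?_setdefault (d : PySem.Dict String Int) (k : String) (w : Int) (x : String) :
    (d.setdefault k w).get? x = (d.get? x).or (if k = x then some w else none) := by
  by_cases hc : d.contains k = true
  · simp only [PySem.Dict.setdefault, hc, if_true]
    by_cases hk : k = x
    · subst hk
      rw [PySem.Dict.contains_eq_isSome_get?] at hc
      obtain ⟨w', hw⟩ := Option.isSome_iff_exists.mp hc
      simp [hw]
    · simp [hk]
  · simp only [PySem.Dict.setdefault, hc]
    simp only [PySem.Dict.get?]
    by_cases hk : k = x
    · cases h : List.find? (fun p => p.1 == x) d.items <;>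
        simp [h, hk, List.find?, Option.or]
    · have hb : (k == x) = false := by simpa using hk
      cases h : List.find? (fun p => p.1 == x) d.items <;>
        simp [h, hk, hb, List.find?, Option.or]

theorem pv_pos_get? (xs : List String) (v : String) :
    ∀ (s : Int) (d : PySem.Dict String Int),
    ((PySem.List.enumerate xs s).foldl (fun d p => d.setdefault p.2 p.1) d).get? v =
      (d.get? v).or ((PySem.List.index? xs v).map (fun n => s + n)) := by
  induction xs with
  | nil => intro s d; simp [PySem.List.enumerate_nil, PySem.List.index?_eq_idxOf?]
  | cons x t ih =>
    intro s d
    rw [PySem.List.enumerate_cons]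
    simp only [List.foldl_cons]
    rw [ih, pv_get?_setdefault]
    by_cases hx : x = v
    · subst hx
      rw [PySem.List.index?_cons_self]
      cases h : d.get? x <;> simp [Option.or]
    · rw [PySem.List.index?_cons_of_ne t hx]
      cases h : d.get? v <;> cases h2 : PySem.List.index? t v <;>
        simp [hx, Option.or] <;> push_cast <;> ring

-- A's first-loop step
def pvStepA (firstName first secondName second : List String)
    (st : List String × List String × List String) (i : Int) :
    List String × List String × List String :=
  match PySem.List.index? secondName (PySem.List.pyGetD firstName i "") with
  | some j => (st.1 ++ [PySem.List.pyGetD first i ""],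
               st.2.1 ++ [PySem.List.pyGetD second (j : Int) ""],
               st.2.2 ++ [PySem.List.pyGetD firstName i ""])
  | none => st

-- B's loop is the first two components of A's first loop
theorem pv_loops_eq (firstName first secondName second : List String) :
    ∀ (l : List Int) (st : List String × List String × List String),
    l.foldl (fun (acc : List String × List String) j =>
        match PySem.List.index? secondName (PySem.List.pyGetD firstName j "") with
        | some n => (acc.1 ++ [PySem.List.pyGetD first j ""],
                     acc.2 ++ [PySem.List.pyGetD second (n : Int) ""])
        | none => acc) (st.1, st.2.1)
      = ((l.foldl (pvStepA firstName first secondName second) st).1,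
         (l.foldl (pvStepA firstName first secondName second) st).2.1) := by
  intro l
  induction l with
  | nil => intro st; rfl
  | cons i t ih =>
    intro st
    simp only [List.foldl_cons]
    cases h : PySem.List.index? secondName (PySem.List.pyGetD firstName i "") with
    | none =>
      have : pvStepA firstName first secondName second st i = st := by
        unfold pvStepA; rw [h]
      rw [this]
      simpa [h] using ih st
    | some n =>
      have : pvStepA firstName first secondName second st i =
          (st.1 ++ [PySem.List.pyGetD first i ""],
           st.2.1 ++ [PySem.List.pyGetD second (n : Int) ""],
           st.2.2 ++ [PySem.List.pyGetD firstName i ""]) := by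
        unfold pvStepA; rw [h]
      rw [this]
      simpa [h] using ih (st.1 ++ [PySem.List.pyGetD first i ""],
           st.2.1 ++ [PySem.List.pyGetD second (n : Int) ""],
           st.2.2 ++ [PySem.List.pyGetD firstName i ""])

-- collectedName only grows
theorem pv_coll_mono (firstName first secondName second : List String) :
    ∀ (l : List Int) (st : List String × List String × List String) (x : String),
    x ∈ st.2.2 → x ∈ (l.foldl (pvStepA firstName first secondName second) st).2.2 := by
  intro l
  induction l with
  | nil => intro st x hx; exact hx
  | cons i t ih =>
    intro st x hx
    simp only [List.foldl_cons]
    apply ih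
    cases h : PySem.List.index? secondName (PySem.List.pyGetD firstName i "") with
    | none =>
      have hs : pvStepA firstName first secondName second st i = st := by
        unfold pvStepA; rw [h]
      rw [hs]; exact hx
    | some n =>
      have hs : (pvStepA firstName first secondName second st i).2.2 =
          st.2.2 ++ [PySem.List.pyGetD firstName i ""] := by
        unfold pvStepA; rw [h]
      rw [hs]; exact List.mem_append_left _ hx

-- every firstName[i] (i scanned) that occurs in secondName ends up in collectedName
theorem pv_coll_contains (firstName first secondName second : List String) :
    ∀ (l : List Int) (st : List String × List String × List String) (i : Int),
    i ∈ l → (PySem.List.index? secondName (PySem.List.pyGetD firstName i "")).isSome →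
    PySem.List.pyGetD firstName i "" ∈ (l.foldl (pvStepA firstName first secondName second) st).2.2 := by
  intro l
  induction l with
  | nil => intro st i hi; exact absurd hi (List.not_mem_nil)
  | cons a t ih =>
    intro st i hi hsome
    simp only [List.foldl_cons]
    rcases List.mem_cons.mp hi with rfl | hit
    · obtain ⟨n, hn⟩ := Option.isSome_iff_exists.mp hsome
      apply pv_coll_mono
      have hs : (pvStepA firstName first secondName second st i).2.2 =
          st.2.2 ++ [PySem.List.pyGetD firstName i ""] := by
        unfold pvStepA; rw [hn]
      rw [hs]
      exact List.mem_append_right _ (List.mem_singleton.mpr rfl)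
    · exact ih _ i hit hsome

-- A's second loop is the identity when collectedName already holds every common name
theorem pv_loop2_id (firstName first secondName second : List String) :
    ∀ (l : List Int) (st : List String × List String × List String),
    (∀ i ∈ l, ∀ j, PySem.List.index? firstName (PySem.List.pyGetD secondName i "") = some j →
        (PySem.List.index? st.2.2 (PySem.List.pyGetD secondName i "")).isSome) →
    l.foldl (fun (st : List String × List String × List String) i =>
      match PySem.List.index? firstName (PySem.List.pyGetD secondName i "") with
      | some j =>
        match PySem.List.index? st.2.2 (PySem.List.pyGetD secondName i "") with
        | some _ => st
        | none => (st.1 ++ [PySem.List.pyGetD first i ""],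
                   st.2.1 ++ [PySem.List.pyGetD second (j : Int) ""],
                   st.2.2)
      | none => st) st = st := by
  intro l
  induction l with
  | nil => intro st _; rfl
  | cons a t ih =>
    intro st h
    simp only [List.foldl_cons]
    have hstep : (match PySem.List.index? firstName (PySem.List.pyGetD secondName a "") with
      | some j =>
        match PySem.List.index? st.2.2 (PySem.List.pyGetD secondName a "") with
        | some _ => st
        | none => (st.1 ++ [PySem.List.pyGetD first a ""],
                   st.2.1 ++ [PySem.List.pyGetD second (j : Int) ""],
                   st.2.2)
      | none => st) = st := by
      cases h1 : PySem.List.index? firstName (PySem.List.pyGetD secondName a "") with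
      | none => rfl
      | some j =>
        have := h a (List.mem_cons_self) j h1
        obtain ⟨k, hk⟩ := Option.isSome_iff_exists.mp this
        rw [hk]
    rw [hstep]
    exact ih st (fun i hi => h i (List.mem_cons_of_mem _ hi))

theorem pv_main (firstName first secondName second : List String) :
    pairNames firstName first secondName second = pairNames_alt firstName first secondName second := by
  unfold pairNames pairNames_alt
  simp only []
  set pos := (PySem.List.enumerate secondName).foldl
    (fun (d : PySem.Dict String Int) p => d.setdefault p.2 p.1) PySem.Dict.empty with hposdef
  have hpos : ∀ v, pos.get? v = (PySem.List.index? secondName v).map (fun n : Nat => (n : Int)) := by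
    intro v
    rw [hposdef, pv_pos_get?]
    cases h : PySem.List.index? secondName v <;>
      simp [PySem.Dict.get?_empty, Option.or]
  have hA : (fun (st : List String × List String × List String) (i : Int) =>
      match PySem.List.index? secondName (PySem.List.pyGetD firstName i "") with
      | some j => (st.1 ++ [PySem.List.pyGetD first i ""],
                   st.2.1 ++ [PySem.List.pyGetD second (j : Int) ""],
                   st.2.2 ++ [PySem.List.pyGetD firstName i ""])
      | none => st) = pvStepA firstName first secondName second := rfl
  rw [hA]
  set s1 := (PySem.List.pyRange 0 (firstName.length : Int) 1).foldl
    (pvStepA firstName first secondName second) ([], [], []) with hs1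
  -- the second loop never changes the state
  have hcoll : ∀ i ∈ PySem.List.pyRange 0 (secondName.length : Int) 1, ∀ j,
      PySem.List.index? firstName (PySem.List.pyGetD secondName i "") = some j →
      (PySem.List.index? s1.2.2 (PySem.List.pyGetD secondName i "")).isSome := by
    intro i hi j hj
    obtain ⟨hi0, hilt⟩ := PySem.List.mem_pyRange_one.mp hi
    have hname : PySem.List.pyGetD secondName i "" = secondName[i.toNat] :=
      PySem.List.pyGetD_eq_getElem _ _ hi0 hilt
    have hmem2 : PySem.List.pyGetD secondName i "" ∈ secondName := by
      rw [hname]; exact List.getElem_mem _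
    obtain ⟨hk, hkeq, -⟩ := PySem.List.getElem_of_index?_eq_some hj
    have hname1 : PySem.List.pyGetD firstName (j : Int) "" = PySem.List.pyGetD secondName i "" := by
      rw [PySem.List.pyGetD_eq_getElem _ _ (Int.natCast_nonneg j) (by exact_mod_cast hk)]
      simpa using hkeq
    have hsome : (PySem.List.index? secondName (PySem.List.pyGetD firstName (j : Int) "")).isSome := by
      rw [hname1]; exact (PySem.List.index?_isSome_iff _ _).mpr hmem2
    have hmemrange : ((j : Int)) ∈ PySem.List.pyRange 0 (firstName.length : Int) 1 :=
      PySem.List.mem_pyRange_one.mpr ⟨Int.natCast_nonneg j, by exact_mod_cast hk⟩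
    have hin := pv_coll_contains firstName first secondName second
      (PySem.List.pyRange 0 (firstName.length : Int) 1) ([], [], []) (j : Int) hmemrange hsome
    rw [hname1] at hin
    exact (PySem.List.index?_isSome_iff _ _).mpr hin
  rw [pv_loop2_id firstName first secondName second _ s1 hcoll]
  -- B's single pass equals the first two components of A's first loop
  rw [PySem.List.enumerate_eq_map_pyRange firstName "", List.foldl_map]
  have hfun : (fun (acc : List String × List String) (j : Int) =>
      match pos.get? ((j, PySem.List.pyGetD firstName j "")).2 with
      | some j' => (acc.1 ++ [PySem.List.pyGetD first ((j, PySem.List.pyGetD firstName j "")).1 ""],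
                    acc.2 ++ [PySem.List.pyGetD second j' ""])
      | none => acc) = (fun (acc : List String × List String) (j : Int) =>
      match PySem.List.index? secondName (PySem.List.pyGetD firstName j "") with
      | some n => (acc.1 ++ [PySem.List.pyGetD first j ""],
                   acc.2 ++ [PySem.List.pyGetD second (n : Int) ""])
      | none => acc) := by
    funext acc j
    simp only []
    rw [hpos]
    cases h : PySem.List.index? secondName (PySem.List.pyGetD firstName j "") <;> rfl
  rw [hfun]
  exact (pv_loops_eq firstName first secondName second
    (PySem.List.pyRange 0 (firstName.length : Int) 1) ([], [], [])).symm

-- ===== VERDICT (by name: the statement is the Claim_ definition above) =====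
theorem pairNames_spec : Claim_equal_pairNames := by
  intro firstName first secondName second _ _
  unfold Spec_pairNames
  exact pv_main firstName first secondName second
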